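-- pv_equiv track=rewrite | github.com/jhs9497/TIL | 2021_하반기/알고리즘/프로그래머스/신규아이디추천.py | solution
-- ===== SOURCE A (Python) =====
-- str_list = ['a', 'b', 'c', 'd', 'e', 'f', 'g', 'h', 'i', 'j', 'k', 'l', 'm', 'n', 'o', 'p', 'q', 'r', 's', 't', 'u',
--             'v', 'w', 'x', 'y', 'z', '0', '1', '2', '3', '4', '5', '6', '7', '8', '9', '-', '_', '.']
--
-- def solution(new_id):
--     # 1단계 소문자 치환
--     new_id = new_id.lower()
--
--     # 리스트가 수정하기 편하므로 리스트로 변환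
--     new_id = list(new_id)
--
--     # 2단계 알파벳, 숫자, '-', '_', '.' 제외한 문자 제거
--     delete_list = []
--     for i in range(len(new_id)):
--         if new_id[i] in str_list:
--             pass
--         else:
--             delete_list.append(i)
--
--     delete_list.reverse()
--     for idx in delete_list:
--         new_id.pop(idx)
--
--     # 3단계 연속된 마침표 제거
--     delete_dot = []
--     for i in range(len(new_id) - 1):
--         if new_id[i] == '.' and new_id[i + 1] == '.':
--             delete_dot.append(i)
--
--     delete_dot.reverse()
--     for idx in delete_dot:
--         new_id.pop(idx)
--
--     # 4단계 마침표가 처음에 위치하면 제거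
--     if new_id and new_id[0] == '.':
--         new_id.pop(0)
--
--     # 5단계 빈 문자열이면 'a'대입
--     if len(new_id) == 0:
--         new_id.append('a')
--
--     # 6단계 길이가 16이상이면 길이조절 + 끝문자가 '.'이면 제거
--     if len(new_id) >= 16:
--         new_id = new_id[0:15]
--
--     if new_id[-1] == '.':
--         new_id.pop(-1)
--
--     # 7단계 2자 이하라면 마지막문자를 길이가 3될때까지 추가
--     if len(new_id) <= 2:
--         while len(new_id) < 3:
--             new_id.append(new_id[-1])
--
--     # 문자화
--     answer = "".join(new_id)
--
--     return answer
-- ===== SOURCE B (Python) =====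
-- ALLOWED = frozenset('abcdefghijklmnopqrstuvwxyz0123456789-_.')
--
-- def solution(new_id):
--     # one pass: keep allowed chars, collapsing consecutive dots via the previous kept char
--     out = []
--     for c in new_id.lower():
--         if c not in ALLOWED:
--             continue
--         if c == '.' and out and out[-1] == '.':
--             continue
--         out.append(c)
--     if out[:1] == ['.']:
--         out = out[1:]
--     if not out:
--         out = ['a']
--     out = out[:15]
--     if out[-1] == '.':
--         out = out[:-1]
--     out += out[-1:] * (3 - len(out))
--     return ''.join(out)
-- ===== Notes on version B (the rewrite author's own statement) =====
-- stated objective: faster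
-- what changed: A lowercases, then twice scans by index to collect positions (disallowed chars, doubled dots) and deletes them with reversed list.pop calls; B does one left-to-right pass that filters via a set and collapses consecutive dots using the previously kept character, then the fixed trimming steps.
import Mathlib
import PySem

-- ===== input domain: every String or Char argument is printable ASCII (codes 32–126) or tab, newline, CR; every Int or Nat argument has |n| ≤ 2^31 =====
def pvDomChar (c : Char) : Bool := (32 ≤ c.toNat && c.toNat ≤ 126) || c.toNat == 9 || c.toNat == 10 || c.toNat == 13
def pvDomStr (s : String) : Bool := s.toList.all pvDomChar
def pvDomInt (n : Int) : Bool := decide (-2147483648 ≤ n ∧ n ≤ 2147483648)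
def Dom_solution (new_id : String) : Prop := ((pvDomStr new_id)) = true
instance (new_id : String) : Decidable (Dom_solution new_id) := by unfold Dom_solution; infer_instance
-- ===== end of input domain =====

-- B replaces A's two index-collecting scans followed by reversed in-place pops with a single
-- left-to-right pass that filters disallowed characters and collapses consecutive dots using
-- the previously kept character, then fixed trimming; objective: faster.


-- ===== PORT A =====
def strList : List Char :=
  ['a', 'b', 'c', 'd', 'e', 'f', 'g', 'h', 'i', 'j', 'k', 'l', 'm', 'n', 'o', 'p', 'q', 'r', 's', 't', 'u',
   'v', 'w', 'x', 'y', 'z', '0', '1', '2', '3', '4', '5', '6', '7', '8', '9', '-', '_', '.']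

-- new_id.pop(idx); a bad idx would be IndexError in Python — unreachable here (all popped indices
-- come from range scans over the current list), the none branch returns l unchanged
def popA {α : Type} (l : List α) (idx : Int) : List α :=
  match PySem.List.pop? l idx with
  | some r => r.2
  | none => l

-- while len < 3: new_id.append(new_id[-1]); new_id[-1] on [] would be IndexError — unreachable
-- (the list is nonempty at step 7), the none branch stops
def padA (l : List Char) : List Char :=
  if _h : l.length < 3 then
    match PySem.List.pyGet? l (-1) with
    | some c => padA (l ++ [c])
    | none => l
  else l
termination_by 3 - l.length
decreasing_by simp_all; omega

def solution (new_id : String) : String :=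
  -- 1단계 소문자 치환
  let l0 : List Char := (PySem.Str.lower new_id).toList
  -- 2단계: collect indices of characters not in str_list, reverse, pop each
  let deleteList : List Int :=
    (PySem.List.pyRange 0 l0.length).foldl
      (fun acc i => if PySem.List.pyGetD l0 i ' ' ∈ strList then acc else acc ++ [i]) []
  let l1 : List Char := deleteList.reverse.foldl popA l0
  -- 3단계: collect indices of doubled dots, reverse, pop each
  let deleteDot : List Int :=
    (PySem.List.pyRange 0 ((l1.length : Int) - 1)).foldl
      (fun acc i => if PySem.List.pyGetD l1 i ' ' = '.' ∧ PySem.List.pyGetD l1 (i + 1) ' ' = '.'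
                    then acc ++ [i] else acc) []
  let l2 : List Char := deleteDot.reverse.foldl popA l1
  -- 4단계
  let l3 : List Char := if l2 ≠ [] ∧ PySem.List.pyGetD l2 0 ' ' = '.' then popA l2 0 else l2
  -- 5단계
  let l4 : List Char := if l3.length = 0 then l3 ++ ['a'] else l3
  -- 6단계
  let l5 : List Char := if l4.length ≥ 16 then PySem.List.slice l4 (some 0) (some 15) else l4
  let l6 : List Char := if PySem.List.pyGetD l5 (-1) ' ' = '.' then popA l5 (-1) else l5
  -- 7단계
  let l7 : List Char := if l6.length ≤ 2 then padA l6 else l6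
  String.mk (PySem.Chars.join [] (l7.map (fun c => [c])))

-- ===== PORT B =====
def allowedSet : PySem.Set Char :=
  PySem.Set.ofList "abcdefghijklmnopqrstuvwxyz0123456789-_.".toList

def solution_alt (new_id : String) : String :=
  -- one pass: keep allowed chars, collapsing consecutive dots via the previous kept char
  let out : List Char :=
    (PySem.Str.lower new_id).toList.foldl
      (fun out c =>
        if ¬ (PySem.Set.contains allowedSet c) then out
        else if c = '.' ∧ out ≠ [] ∧ PySem.List.pyGetD out (-1) ' ' = '.' then out
        else out ++ [c]) []
  let o1 := if PySem.List.slice out none (some 1) = ['.'] then PySem.List.slice out (some 1) none else out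
  let o2 := if o1 = [] then ['a'] else o1
  let o3 := PySem.List.slice o2 none (some 15)
  let o4 := if PySem.List.pyGetD o3 (-1) ' ' = '.' then PySem.List.slice o3 none (some (-1)) else o3
  let o5 := o4 ++ (List.replicate (3 - o4.length) (PySem.List.slice o4 (some (-1)) none)).flatten
  String.mk (PySem.Chars.join [] (o5.map (fun c => [c])))

-- ===== PRECONDITION & SPEC =====
def Spec_solution (new_id : String) (out : String) : Prop := out = solution_alt new_id
instance (new_id : String) (out : String) : Decidable (Spec_solution new_id out) := by unfold Spec_solution; infer_instance

-- ===== CLAIM (what is proved, stated in full; the proofs are below) =====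
def Claim_equal_solution : Prop := ∀ (new_id : String), Dom_solution new_id → Spec_solution new_id (solution new_id)

-- ===== LEMMAS AND PROOFS =====

-- proof-side names for the stages of the two ports (definitionally equal to the let-chains above)
def stage2A (l : List Char) : List Char :=
  (((PySem.List.pyRange 0 l.length).foldl
      (fun acc i => if PySem.List.pyGetD l i ' ' ∈ strList then acc else acc ++ [i]) []).reverse).foldl popA l

def stage3A (l : List Char) : List Char :=
  (((PySem.List.pyRange 0 ((l.length : Int) - 1)).foldl
      (fun acc i => if PySem.List.pyGetD l i ' ' = '.' ∧ PySem.List.pyGetD l (i + 1) ' ' = '.'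
                    then acc ++ [i] else acc) []).reverse).foldl popA l

def stA4 (t : List Char) : List Char := if t ≠ [] ∧ PySem.List.pyGetD t 0 ' ' = '.' then popA t 0 else t
def stA5 (t : List Char) : List Char := if t.length = 0 then t ++ ['a'] else t
def stA6a (t : List Char) : List Char := if t.length ≥ 16 then PySem.List.slice t (some 0) (some 15) else t
def stA6b (t : List Char) : List Char := if PySem.List.pyGetD t (-1) ' ' = '.' then popA t (-1) else t
def stA7 (t : List Char) : List Char := if t.length ≤ 2 then padA t else t

def trimA (t : List Char) : List Char := stA7 (stA6b (stA6a (stA5 (stA4 t))))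

def bPass (l : List Char) : List Char :=
  l.foldl
    (fun out c =>
      if ¬ (PySem.Set.contains allowedSet c) then out
      else if c = '.' ∧ out ≠ [] ∧ PySem.List.pyGetD out (-1) ' ' = '.' then out
      else out ++ [c]) []

-- out += out[-1:] * (3 - len(out)); a non-positive Python multiplier yields []
def padB (l : List Char) : List Char :=
  l ++ (List.replicate (3 - l.length) (PySem.List.slice l (some (-1)) none)).flatten

def stB4 (t : List Char) : List Char :=
  if PySem.List.slice t none (some 1) = ['.'] then PySem.List.slice t (some 1) none else t
def stB5 (t : List Char) : List Char := if t = [] then ['a'] else t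
def stB6a (t : List Char) : List Char := PySem.List.slice t none (some 15)
def stB6b (t : List Char) : List Char :=
  if PySem.List.pyGetD t (-1) ' ' = '.' then PySem.List.slice t none (some (-1)) else t

def trimB (t : List Char) : List Char := padB (stB6b (stB6a (stB5 (stB4 t))))

lemma solution_eq (s : String) :
    solution s = String.mk (PySem.Chars.join []
      ((trimA (stage3A (stage2A (PySem.Str.lower s).toList))).map (fun c => [c]))) := rfl

lemma solution_alt_eq (s : String) :
    solution_alt s = String.mk (PySem.Chars.join []
      ((trimB (bPass (PySem.Str.lower s).toList)).map (fun c => [c]))) := rfl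

-- keep the elements of l whose position (0-based, below m) fails q
def keepIdx {α : Type} (q : Int → Bool) (m : Nat) : List α → List α
  | [] => []
  | x :: xs =>
    match m with
    | 0 => x :: xs
    | m' + 1 => (if q 0 then [] else [x]) ++ keepIdx (fun i => q (i + 1)) m' xs

-- collapse doubled dots keeping the LAST dot of each run (A's rule: drop index i when l[i]=l[i+1]='.')
def keepLast : List Char → List Char
  | [] => []
  | [c] => [c]
  | c :: d :: r => if c = '.' ∧ d = '.' then keepLast (d :: r) else c :: keepLast (d :: r)

-- collapse relative to the previously kept character (B's rule)
def collP : Option Char → List Char → List Char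
  | _, [] => []
  | prev, c :: r => if c = '.' ∧ prev = some '.' then collP prev r else c :: collP (some c) r

lemma keepIdx_congr {α : Type} (q q' : Int → Bool) (m : Nat) (l : List α)
    (h : ∀ i : Int, 0 ≤ i → q i = q' i) : keepIdx q m l = keepIdx q' m l := by
  induction l generalizing q q' m with
  | nil => simp [keepIdx]
  | cons x xs ih =>
    cases m with
    | zero => rfl
    | succ m' =>
      simp only [keepIdx, h 0 le_rfl]
      rw [ih (fun i => q (i + 1)) (fun i => q' (i + 1)) m' (fun i hi => h (i + 1) (by omega))]

lemma pyGetD_cons_succ {α : Type} (x : α) (xs : List α) (i : Int) (d : α) (hi : 0 ≤ i) :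
    PySem.List.pyGetD (x :: xs) (i + 1) d = PySem.List.pyGetD xs i d := by
  obtain ⟨n, rfl⟩ : ∃ n : Nat, i = (n : Int) := ⟨i.toNat, (Int.toNat_of_nonneg hi).symm⟩
  have h1 : ((n : Int) + 1) = ((n + 1 : Nat) : Int) := by push_cast; ring
  rw [h1, PySem.List.pyGetD_natCast, PySem.List.pyGetD_natCast]
  rfl

lemma popA_natCast {α : Type} (xs : List α) (n : Nat) (h : n < xs.length) :
    popA xs (n : Int) = xs.eraseIdx n := by
  simp [popA, PySem.List.pop?_natCast xs n h]

-- popping a strictly descending list of in-range indices, all shifted by one, leaves the head alone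
lemma pops_shift {α : Type} (D : List Int) (x : α) (xs : List α)
    (hd : D.Pairwise (· > ·)) (hb : ∀ i ∈ D, 0 ≤ i ∧ i < xs.length) :
    (D.map (· + 1)).foldl popA (x :: xs) = x :: D.foldl popA xs := by
  induction D generalizing xs with
  | nil => rfl
  | cons d D' ih =>
    obtain ⟨hdD, hd'⟩ := List.pairwise_cons.mp hd
    obtain ⟨hd0, hdlen⟩ := hb d (List.mem_cons_self ..)
    obtain ⟨n, rfl⟩ : ∃ n : Nat, d = (n : Int) := ⟨d.toNat, (Int.toNat_of_nonneg hd0).symm⟩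
    have hn : n < xs.length := by omega
    simp only [List.map_cons, List.foldl_cons]
    have hx : popA (x :: xs) ((n : Int) + 1) = x :: popA xs (n : Int) := by
      rw [show ((n : Int) + 1) = ((n + 1 : Nat) : Int) by push_cast; ring]
      rw [popA_natCast _ _ (by simpa using Nat.succ_lt_succ hn), popA_natCast xs n hn]
      rfl
    rw [hx, popA_natCast xs n hn,
      ih (xs.eraseIdx n) hd' (fun i hi => by
        have h1 := hb i (List.mem_cons_of_mem _ hi)
        have h2 := hdD i hi
        rw [List.length_eraseIdx_of_lt hn]
        omega),
      ← popA_natCast xs n hn]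

lemma pyRange_one_shift (m : Nat) :
    PySem.List.pyRange 1 ((m : Int) + 1) = (PySem.List.pyRange 0 (m : Int)).map (· + 1) := by
  rw [PySem.List.pyRange_one, PySem.List.pyRange_one]
  rw [show ((m : Int) + 1 - 1).toNat = m by omega, show ((m : Int) - 0).toNat = m by omega,
    List.map_map]
  apply List.map_congr_left
  intro k _
  simp only [Function.comp]
  ring

-- popping the reversed q-filtered range [0, m) from l keeps the positions failing q
lemma pops_range_filter {α : Type} (l : List α) (q : Int → Bool) (m : Nat) (hm : m ≤ l.length) :
    (((PySem.List.pyRange 0 (m : Int)).filter q).reverse).foldl popA l = keepIdx q m l := by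
  induction l generalizing q m with
  | nil =>
    have hm0 : m = 0 := by simpa using hm
    subst hm0
    simp [PySem.List.pyRange_one_eq_nil, keepIdx]
  | cons x xs ih =>
    cases m with
    | zero => simp [PySem.List.pyRange_one_eq_nil, keepIdx]
    | succ m' =>
      rw [show (((m' + 1 : Nat)) : Int) = (m' : Int) + 1 by push_cast; ring,
        PySem.List.pyRange_one_cons (by positivity), show (0 : Int) + 1 = 1 by ring,
        pyRange_one_shift m', List.filter_cons]
      have hm' : m' ≤ xs.length := by simpa using hm
      have hshift :
          ((((PySem.List.pyRange 0 (m' : Int)).map (· + 1)).filter q).reverse).foldl popA (x :: xs)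
            = x :: keepIdx (fun i => q (i + 1)) m' xs := by
        rw [List.filter_map, ← List.map_reverse]
        rw [pops_shift _ x xs
          (by
            rw [List.pairwise_reverse]
            exact ((PySem.List.pairwise_lt_pyRange_one 0 (m' : Int)).filter _).imp (fun h => h))
          (fun i hi => by
            have : i ∈ PySem.List.pyRange 0 (m' : Int) := by
              have := List.mem_reverse.mp hi
              exact List.mem_of_mem_filter this
            have h2 := (PySem.List.mem_pyRange_one).mp this
            omega)]
        rw [show (q ∘ fun x : Int => x + 1) = (fun i => q (i + 1)) from rfl,
          ih (fun i => q (i + 1)) m' hm']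
      by_cases hq : q 0 = true
      · simp only [hq, if_pos]
        rw [List.reverse_cons, List.foldl_append, hshift]
        simp only [List.foldl_cons, List.foldl_nil]
        rw [show popA (x :: keepIdx (fun i => q (i + 1)) m' xs) 0
              = keepIdx (fun i => q (i + 1)) m' xs by
            simp [popA, PySem.List.pop?_zero_cons]]
        simp [keepIdx, hq]
      · simp only [hq, Bool.false_eq_true, if_neg, not_false_iff]
        rw [hshift]
        simp [keepIdx, hq]

lemma keepIdx_not_mem (l : List Char) :
    keepIdx (fun i => decide ¬(PySem.List.pyGetD l i ' ' ∈ strList)) l.length l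
      = l.filter (fun c => decide (c ∈ strList)) := by
  induction l with
  | nil => simp [keepIdx]
  | cons x xs ih =>
    simp only [List.length_cons, keepIdx, PySem.List.pyGetD_zero_cons]
    rw [keepIdx_congr _ (fun i => decide ¬(PySem.List.pyGetD xs i ' ' ∈ strList)) xs.length xs
      (fun i hi => by rw [pyGetD_cons_succ x xs i ' ' hi]), ih, List.filter_cons]
    by_cases hx : x ∈ strList <;> simp [hx]

lemma stage2A_eq (l : List Char) : stage2A l = l.filter (fun c => decide (c ∈ strList)) := by
  unfold stage2A
  have hf : (fun (acc : List Int) i => if PySem.List.pyGetD l i ' ' ∈ strList then acc else acc ++ [i])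
      = (fun acc i => if ¬(PySem.List.pyGetD l i ' ' ∈ strList) then acc ++ [i] else acc) := by
    funext acc i
    rw [ite_not]
  rw [hf]
  rw [show (fun (acc : List Int) i => if ¬(PySem.List.pyGetD l i ' ' ∈ strList) then acc ++ [i] else acc)
        = (fun acc i => if ¬(PySem.List.pyGetD l i ' ' ∈ strList) then acc ++ [(fun j : Int => j) i] else acc)
      from rfl,
    PySem.List.foldl_append_ite (fun i => ¬(PySem.List.pyGetD l i ' ' ∈ strList)) (fun j : Int => j)]
  simp only [List.nil_append, List.map_id_fun', id]
  rw [pops_range_filter l _ l.length le_rfl, keepIdx_not_mem]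

lemma keepIdx_dot (t : List Char) :
    keepIdx (fun i => decide (PySem.List.pyGetD t i ' ' = '.' ∧ PySem.List.pyGetD t (i + 1) ' ' = '.'))
      (t.length - 1) t = keepLast t := by
  induction t with
  | nil => simp [keepIdx, keepLast]
  | cons c r ih =>
    cases r with
    | nil => simp [keepIdx, keepLast]
    | cons d r' =>
      simp only [List.length_cons]
      rw [show r'.length + 1 + 1 - 1 = r'.length + 1 from rfl]
      simp only [keepIdx]
      rw [keepIdx_congr _
        (fun i => decide (PySem.List.pyGetD (d :: r') i ' ' = '.' ∧ PySem.List.pyGetD (d :: r') (i + 1) ' ' = '.'))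
        r'.length (d :: r')
        (fun i hi => by
          rw [pyGetD_cons_succ c (d :: r') i ' ' hi, pyGetD_cons_succ c (d :: r') (i + 1) ' ' (by omega)])]
      rw [show r'.length = (d :: r').length - 1 from rfl, ih]
      have h2 : PySem.List.pyGetD (c :: d :: r') (1 : Int) ' ' = d := by
        rw [show (1 : Int) = 0 + 1 from rfl, pyGetD_cons_succ c (d :: r') 0 ' ' le_rfl,
          PySem.List.pyGetD_zero_cons]
      have hq : (decide (PySem.List.pyGetD (c :: d :: r') 0 ' ' = '.' ∧
            PySem.List.pyGetD (c :: d :: r') (0 + 1) ' ' = '.'))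
          = decide (c = '.' ∧ d = '.') := by
        simp only [show ((0 : Int) + 1) = 1 from rfl, PySem.List.pyGetD_zero_cons, h2]
      simp only [hq]
      by_cases h : c = '.' ∧ d = '.' <;> simp [keepLast, h]

lemma stage3A_eq (l : List Char) : stage3A l = keepLast l := by
  unfold stage3A
  cases l with
  | nil => simp [PySem.List.pyRange_one_eq_nil, keepLast]
  | cons c r =>
    rw [PySem.List.foldl_append_ite
      (fun i => PySem.List.pyGetD (c :: r) i ' ' = '.' ∧ PySem.List.pyGetD (c :: r) (i + 1) ' ' = '.')
      (fun j : Int => j)]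
    simp only [List.nil_append]
    rw [show (((c :: r).length : Int) - 1) = (((c :: r).length - 1 : Nat) : Int) by
      push_cast [List.length_cons]; omega]
    rw [show (List.map (fun j : Int => j) (List.filter _ (PySem.List.pyRange 0 (((c :: r).length - 1 : Nat) : Int)))) = (List.filter (fun i => decide (PySem.List.pyGetD (c :: r) i ' ' = '.' ∧ PySem.List.pyGetD (c :: r) (i + 1) ' ' = '.')) (PySem.List.pyRange 0 (((c :: r).length - 1 : Nat) : Int))) by simp]
    rw [pops_range_filter (c :: r) _ ((c :: r).length - 1) (by simp), keepIdx_dot]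

lemma keepLast_head (t : List Char) (h : t ≠ []) : (keepLast t).head? = t.head? := by
  induction t using keepLast.induct with
  | case1 => simp at h
  | case2 c => simp [keepLast]
  | case3 c d r hcd ih =>
    obtain ⟨hc, hd⟩ := hcd
    subst hc; subst hd
    rw [show keepLast ('.' :: '.' :: r) = keepLast ('.' :: r) by simp [keepLast]]
    rw [ih (by simp)]
    simp
  | case4 c d r hcd _ =>
    rw [show keepLast (c :: d :: r) = c :: keepLast (d :: r) by simp [keepLast, hcd]]
    simp

lemma keepLast_cons_ne (c : Char) (r : List Char) (hc : c ≠ '.') :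
    keepLast (c :: r) = c :: keepLast r := by
  cases r with
  | nil => simp [keepLast]
  | cons d r' =>
    simp only [keepLast]
    rw [if_neg (fun h => hc h.1)]

-- dropLeadDot: remove one leading dot
def dropLeadDot : List Char → List Char
  | [] => []
  | c :: r => if c = '.' then r else c :: r

lemma dropLeadDot_of_head_ne (l : List Char) (h : l.head? ≠ some '.') : dropLeadDot l = l := by
  cases l with
  | nil => rfl
  | cons c r =>
    simp only [List.head?_cons, ne_eq, Option.some.injEq] at h
    simp [dropLeadDot, h]

lemma dropLeadDot_keepLast_ne (d : Char) (r : List Char) (hd : d ≠ '.') :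
    dropLeadDot (keepLast (d :: r)) = keepLast (d :: r) := by
  apply dropLeadDot_of_head_ne
  rw [keepLast_head (d :: r) (by simp)]
  simp [hd]

lemma dot_cons_dropLeadDot (r : List Char) :
    '.' :: dropLeadDot (keepLast ('.' :: r)) = keepLast ('.' :: r) := by
  have hh := keepLast_head ('.' :: r) (by simp)
  cases hkl : keepLast ('.' :: r) with
  | nil => rw [hkl] at hh; simp at hh
  | cons y ys =>
    rw [hkl] at hh
    simp only [List.head?_cons, Option.some.injEq] at hh
    subst hh
    simp [dropLeadDot]

lemma collP_keepLast (t : List Char) :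
    (∀ prev, prev ≠ some '.' → collP prev t = keepLast t) ∧
      collP (some '.') t = dropLeadDot (keepLast t) := by
  induction t with
  | nil => exact ⟨fun _ _ => rfl, rfl⟩
  | cons c r ih =>
    obtain ⟨ih1, ih2⟩ := ih
    constructor
    · intro prev hprev
      rw [show collP prev (c :: r) = c :: collP (some c) r by
        simp only [collP]; rw [if_neg (fun h => hprev h.2)]]
      by_cases hc : c = '.'
      · subst hc
        rw [ih2]
        cases r with
        | nil => simp [keepLast, dropLeadDot]
        | cons d r2 =>
          by_cases hd : d = '.'
          · subst hd
            rw [show keepLast ('.' :: '.' :: r2) = keepLast ('.' :: r2) by simp [keepLast]]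
            exact dot_cons_dropLeadDot r2
          · rw [show keepLast ('.' :: d :: r2) = '.' :: keepLast (d :: r2) by
              simp only [keepLast]; rw [if_neg (fun h => hd h.2)]]
            rw [dropLeadDot_keepLast_ne d r2 hd]
      · rw [ih1 (some c) (by simp [hc]), keepLast_cons_ne c r hc]
    · by_cases hc : c = '.'
      · subst hc
        rw [show collP (some '.') ('.' :: r) = collP (some '.') r by simp [collP]]
        rw [ih2]
        cases r with
        | nil => simp [keepLast, dropLeadDot]
        | cons d r2 =>
          by_cases hd : d = '.'
          · subst hd
            rw [show keepLast ('.' :: '.' :: r2) = keepLast ('.' :: r2) by simp [keepLast]]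
          · rw [show keepLast ('.' :: d :: r2) = '.' :: keepLast (d :: r2) by
              simp only [keepLast]; rw [if_neg (fun h => hd h.2)]]
            rw [dropLeadDot_keepLast_ne d r2 hd]
            simp [dropLeadDot]
      · rw [show collP (some '.') (c :: r) = c :: collP (some c) r by
          simp only [collP]; rw [if_neg (fun h => hc h.1)]]
        rw [ih1 (some c) (by simp [hc]), ← keepLast_cons_ne c r hc]
        rw [dropLeadDot_of_head_ne _ (by rw [keepLast_head (c :: r) (by simp)]; simp [hc])]

lemma allowed_eq (c : Char) : PySem.Set.contains allowedSet c = decide (c ∈ strList) := by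
  rw [show allowedSet = strList by decide]
  simp [PySem.Set.contains]

lemma bPass_invariant (s : List Char) (acc : List Char) :
    s.foldl
      (fun out c =>
        if ¬ (PySem.Set.contains allowedSet c) then out
        else if c = '.' ∧ out ≠ [] ∧ PySem.List.pyGetD out (-1) ' ' = '.' then out
        else out ++ [c]) acc
    = acc ++ collP acc.getLast? (s.filter (fun c => PySem.Set.contains allowedSet c)) := by
  induction s generalizing acc with
  | nil => simp [collP]
  | cons c s' ih =>
    simp only [List.foldl_cons, List.filter_cons]
    by_cases h1 : c ∈ allowedSet
    · by_cases h2 : c = '.' ∧ acc ≠ [] ∧ PySem.List.pyGetD acc (-1) ' ' = '.'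
      · rw [show (if ¬(PySem.Set.contains allowedSet c = true) then acc
              else if c = '.' ∧ acc ≠ [] ∧ PySem.List.pyGetD acc (-1) ' ' = '.' then acc
              else acc ++ [c]) = acc by simp [PySem.Set.contains, h2]]
        rw [ih acc, if_pos (by simp [PySem.Set.contains, h1])]
        obtain ⟨hc, hne, hdot⟩ := h2
        rw [PySem.List.pyGetD_neg_one acc ' ' hne] at hdot
        have hlast : acc.getLast? = some '.' := by
          rw [List.getLast?_eq_getLast hne, hdot]
        subst hc
        rw [show collP acc.getLast? ('.' :: List.filter (fun c => PySem.Set.contains allowedSet c) s')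
              = collP acc.getLast? (List.filter (fun c => PySem.Set.contains allowedSet c) s') by
          simp only [collP]; simp [hlast]]
      · rw [show (if ¬(PySem.Set.contains allowedSet c = true) then acc
              else if c = '.' ∧ acc ≠ [] ∧ PySem.List.pyGetD acc (-1) ' ' = '.' then acc
              else acc ++ [c]) = acc ++ [c] by simp [PySem.Set.contains, h1, h2]]
        rw [ih (acc ++ [c]), if_pos (by simp [PySem.Set.contains, h1])]
        have hcond : ¬(c = '.' ∧ acc.getLast? = some '.') := by
          rintro ⟨hc, hl⟩
          apply h2
          have hne : acc ≠ [] := by rintro rfl; simp at hl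
          refine ⟨hc, hne, ?_⟩
          rw [PySem.List.pyGetD_neg_one acc ' ' hne]
          have hg := List.getLast?_eq_getLast hne
          rw [hg] at hl
          exact Option.some.inj hl
        rw [show collP acc.getLast? (c :: List.filter (fun c => PySem.Set.contains allowedSet c) s')
              = c :: collP (some c) (List.filter (fun c => PySem.Set.contains allowedSet c) s') by
          simp only [collP]; rw [if_neg hcond]]
        rw [List.getLast?_concat]
        simp
    · rw [show (if ¬(PySem.Set.contains allowedSet c = true) then acc
            else if c = '.' ∧ acc ≠ [] ∧ PySem.List.pyGetD acc (-1) ' ' = '.' then acc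
            else acc ++ [c]) = acc by simp [PySem.Set.contains, h1]]
      rw [ih acc, if_neg (by simp [PySem.Set.contains, h1])]

lemma bPass_eq (l : List Char) : bPass l = keepLast (l.filter (fun c => decide (c ∈ strList))) := by
  unfold bPass
  rw [bPass_invariant l []]
  simp only [List.nil_append, List.getLast?_nil]
  rw [(collP_keepLast _).1 none (by simp)]
  congr 1
  apply List.filter_congr
  intro c _
  rw [allowed_eq]

lemma padA_eq_padB (l : List Char) : padA l = padB l := by
  unfold padB
  rw [PySem.List.slice_from_neg_one]
  rcases l with _ | ⟨a, _ | ⟨b, _ | ⟨c, r⟩⟩⟩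
  · simp [padA, PySem.List.pyGet?, PySem.List.pyIdx?]
  · simp [padA, PySem.List.pyGet?, PySem.List.pyIdx?]
  · simp [padA, PySem.List.pyGet?, PySem.List.pyIdx?]
  · rw [padA.eq_def]
    simp only [List.length_cons]
    rw [dif_neg (by omega)]
    rw [show 3 - (r.length + 1 + 1 + 1) = 0 by omega]
    simp

lemma padB_of_ge (l : List Char) (h : ¬ l.length < 3) : padB l = l := by
  unfold padB
  rw [show 3 - l.length = 0 by omega]
  simp

lemma st4_eq (t : List Char) : stA4 t = stB4 t := by
  unfold stA4 stB4
  rw [PySem.List.slice_to _ (by norm_num : (0 : Int) ≤ 1),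
    PySem.List.slice_from _ (by norm_num : (0 : Int) ≤ 1)]
  cases t with
  | nil => simp
  | cons c r =>
    simp only [ne_eq, List.cons_ne_nil, not_false_iff, true_and, PySem.List.pyGetD_zero_cons]
    rw [show ((1 : Int)).toNat = 1 from rfl]
    rw [show List.take 1 (c :: r) = [c] by simp, show List.drop 1 (c :: r) = r from rfl]
    by_cases hc : c = '.'
    · subst hc
      simp [popA, PySem.List.pop?_zero_cons]
    · simp [hc]

lemma st5_eq (u : List Char) : stA5 u = stB5 u := by
  unfold stA5 stB5
  cases u <;> simp

lemma st5_ne (u : List Char) : stB5 u ≠ [] := by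
  unfold stB5
  cases u <;> simp

lemma st6_eq (v : List Char) : stA6a v = stB6a v := by
  unfold stA6a stB6a
  rw [PySem.List.slice_zero_start, PySem.List.slice_to _ (by norm_num : (0 : Int) ≤ 15),
    show ((15 : Int)).toNat = 15 from rfl]
  by_cases h : v.length ≥ 16
  · simp [h]
  · rw [if_neg h, List.take_of_length_le (by omega)]

lemma st6a_ne (v : List Char) (hv : v ≠ []) : stB6a v ≠ [] := by
  unfold stB6a
  rw [PySem.List.slice_to _ (by norm_num : (0 : Int) ≤ 15)]
  simp only [ne_eq, List.take_eq_nil_iff]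
  simp [hv]

lemma st7_eq (w : List Char) (hw : w ≠ []) : stA6b w = stB6b w := by
  unfold stA6b stB6b
  rcases (List.eq_nil_or_concat w) with h | ⟨L, b, rfl⟩
  · exact absurd h hw
  · simp only [List.concat_eq_append]
    rw [PySem.List.slice_to_neg_one, List.dropLast_concat]
    rw [show popA (L ++ [b]) (-1) = L by simp [popA, PySem.List.pop?_last]]

lemma st8_eq (x : List Char) : stA7 x = padB x := by
  unfold stA7
  by_cases h : x.length ≤ 2
  · rw [if_pos h, padA_eq_padB x]
  · rw [if_neg h, padB_of_ge x (by omega)]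

lemma trim_eq (t : List Char) : trimA t = trimB t := by
  unfold trimA trimB
  rw [st4_eq t, st5_eq, st6_eq, st7_eq _ (st6a_ne _ (st5_ne _)), st8_eq]

-- ===== VERDICT (by name: the statement is the Claim_ definition above) =====
theorem solution_spec : Claim_equal_solution := by
  intro new_id _
  unfold Spec_solution
  rw [solution_eq, solution_alt_eq, stage2A_eq, stage3A_eq, bPass_eq, trim_eq]
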